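-- pv_equiv track=rewrite | github.com/Blk-S-Bellamy/ChucklenutsDBL | CNDBL_0_4.py | in_tuple
-- ===== SOURCE A (Python) =====
-- def in_tuple(data_tuple : tuple):
--     # finds the length of every list in the tuple and then find the longest list out of them all.
--     iterations = sorted([len(item) for item in data_tuple if type(item) == list])[-1]
--     data_list = []
--
--     for i in range(iterations):
--         tup = []
--         for index in data_tuple:
--
--             if type(index) == list:
--                 try:
--                     tup.append(index[i])
--                 except IndexError:
--                     tup.append(None)
--             else:
--                 tup.append(index)
--         data_list.append(tup)
--
--     return data_list
-- ===== SOURCE B (Python) =====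
-- def in_tuple(data_tuple : tuple):
--     # column-major: normalize each element to a full column (padded lists, broadcast
--     # scalars), then transpose via zip
--     iterations = sorted([len(item) for item in data_tuple if type(item) == list])[-1]
--     columns = [
--         [element[i] if i < len(element) else None for i in range(iterations)]
--         if type(element) == list else [element] * iterations
--         for element in data_tuple
--     ]
--     return [list(row) for row in zip(*columns)]
-- ===== Notes on version B (the rewrite author's own statement) =====
-- stated objective: alternative
-- what changed: B builds one fully padded column per input element (pad short lists with None, broadcast non-list elements) and transposes the columns with zip(*...), replacing A's row-major nested loop that appends cell-by-cell with try/except per cell; the fixed Lean signature List (List Int) only covers all-list tuples, on which both Pythons agree, and B's scalar broadcast matches A's else-branch in Python too.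
-- outside the precondition, e.g. on in_tuple(()): A raises IndexError, B raises IndexError
import Mathlib
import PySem

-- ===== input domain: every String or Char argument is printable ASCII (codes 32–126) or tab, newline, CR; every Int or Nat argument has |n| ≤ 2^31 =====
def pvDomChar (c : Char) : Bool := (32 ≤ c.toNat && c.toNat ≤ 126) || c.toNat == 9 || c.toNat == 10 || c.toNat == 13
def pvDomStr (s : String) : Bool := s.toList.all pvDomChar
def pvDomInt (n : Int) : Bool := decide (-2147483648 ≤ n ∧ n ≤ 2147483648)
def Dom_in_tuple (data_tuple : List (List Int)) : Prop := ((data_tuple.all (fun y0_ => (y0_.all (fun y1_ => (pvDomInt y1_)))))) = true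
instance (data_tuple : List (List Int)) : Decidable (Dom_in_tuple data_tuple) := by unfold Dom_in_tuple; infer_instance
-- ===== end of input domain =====

-- B changes the decomposition: it builds one fully padded column per input element and
-- transposes the columns with zip, instead of A's row-major nested append loop with a
-- try/except per cell (objective: alternative; same return value, same cost).
-- NOTE on the signature: the task fixes the argument type as List (List Int), so every
-- element is a list and Python A's 'type(index) == list' test is always true here; the
-- scalar-broadcast else-branch of both Pythons (A appends the scalar per row, B writes
-- [element]*iterations) is outside this signature, not excluded by Pre_in_tuple. The two
-- Python programs agree on scalar-carrying tuples as well (tested), but that region is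
-- not expressible — and hence not claimed — under the given Lean type.

-- ===== PORT A =====
-- 'sorted(...)[-1]' raises IndexError on an empty data_tuple; the port is exact under
-- Pre_in_tuple (data_tuple ≠ []), where pyGet? (-1) returns some; '.getD 0' only totalizes.
def in_tuple (data_tuple : List (List Int)) : List (List (Option Int)) :=
  let iterations : Int :=
    (PySem.List.pyGet? (PySem.List.sorted (data_tuple.map (fun item => (item.length : Int))) (fun x => x) false) (-1)).getD 0
  (PySem.List.pyRange 0 iterations 1).foldl
    (fun data_list i =>
      data_list ++
        [data_tuple.foldl (fun tup index => tup ++ [PySem.List.pyGet? index i]) []])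
    []

-- ===== PORT B =====
-- zip(*columns): take the heads of all columns as a row while every column is nonempty.
def pvZipStar (cols : List (List (Option Int))) : List (List (Option Int)) :=
  if h : cols ≠ [] ∧ cols.all (fun c => !c.isEmpty) then
    cols.map (fun c => c.headD none) :: pvZipStar (cols.map List.tail)
  else []
termination_by (cols.headD []).length
decreasing_by
  obtain ⟨hne, hall⟩ := h
  cases cols with
  | nil => exact absurd rfl hne
  | cons c cs =>
    simp only [List.headD_cons]
    cases c with
    | nil => simp [List.all_cons] at hall
    | cons a as => simp

def in_tuple_alt (data_tuple : List (List Int)) : List (List (Option Int)) :=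
  let iterations : Int :=
    (PySem.List.pyGet? (PySem.List.sorted (data_tuple.map (fun item => (item.length : Int))) (fun x => x) false) (-1)).getD 0
  let columns : List (List (Option Int)) :=
    data_tuple.map (fun element =>
      (PySem.List.pyRange 0 iterations 1).map (fun i =>
        if i < (element.length : Int) then some (PySem.List.pyGetD element i 0) else none))
  pvZipStar columns

-- ===== PRECONDITION & SPEC =====
-- Pre_in_tuple excludes exactly the empty tuple, on which Python A (and Python B alike)
-- raises IndexError at sorted([])[-1]; on every nonempty input of the signature A returns
-- normally and the claim below matches it.
def Pre_in_tuple (data_tuple : List (List Int)) : Prop := data_tuple ≠ []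
instance (data_tuple : List (List Int)) : Decidable (Pre_in_tuple data_tuple) := by unfold Pre_in_tuple; infer_instance
def pvWitness_in_tuple : List (List Int) := [[1, 2], [3]]
def Spec_in_tuple (data_tuple : List (List Int)) (out : List (List (Option Int))) : Prop := out = in_tuple_alt data_tuple
instance (data_tuple : List (List Int)) (out : List (List (Option Int))) : Decidable (Spec_in_tuple data_tuple out) := by unfold Spec_in_tuple; infer_instance

-- ===== CLAIM (what is proved, stated in full; the proofs are below) =====
def Claim_equal_in_tuple : Prop := ∀ (data_tuple : List (List Int)), Dom_in_tuple data_tuple → Pre_in_tuple data_tuple → Spec_in_tuple data_tuple (in_tuple data_tuple)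

-- ===== LEMMAS AND PROOFS =====

-- zip of equal-length columns, each column generated pointwise, is the row-major table.
theorem pvZipStar_map_range (n : Nat) (dt : List (List Int)) (hdt : dt ≠ [])
    (g : List Int → Nat → Option Int) :
    pvZipStar (dt.map (fun x => (List.range n).map (g x))) =
      (List.range n).map (fun i => dt.map (fun x => g x i)) := by
  induction n generalizing g with
  | zero =>
    rw [pvZipStar]
    cases dt with
    | nil => exact absurd rfl hdt
    | cons a as => simp
  | succ n ih =>
    rw [List.range_succ_eq_map, pvZipStar]
    have hcond : (dt.map fun x => (List.map (g x) (0 :: List.map Nat.succ (List.range n)))) ≠ [] ∧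
        ((dt.map fun x => (List.map (g x) (0 :: List.map Nat.succ (List.range n)))).all
          (fun c => !c.isEmpty)) := by
      constructor
      · simpa using hdt
      · simp [List.all_map, List.all_eq_true]
    rw [dif_pos hcond]
    have htails : (dt.map fun x => List.map (g x) (0 :: List.map Nat.succ (List.range n))).map List.tail
        = dt.map (fun x => (List.range n).map (fun i => g x (i + 1))) := by
      simp [List.map_map, Function.comp_def]
    rw [htails, ih (fun x i => g x (i + 1))]
    simp [List.map_map, Function.comp_def, Nat.succ_eq_add_one]

theorem flatten_map_singleton (dt : List (List Int)) (f : List Int → Option Int) :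
    (List.map (fun x => [f x]) dt).flatten = List.map f dt := by
  induction dt with
  | nil => rfl
  | cons a as ih => simp [ih]

theorem column_entry (x : List Int) (i : Nat) :
    (if (i : Int) < (x.length : Int) then some (PySem.List.pyGetD x (i : Int) 0) else none)
      = PySem.List.pyGet? x (i : Int) := by
  by_cases h : i < x.length
  · rw [if_pos (by exact_mod_cast h)]
    rw [PySem.List.pyGetD_natCast, PySem.List.pyGet?_natCast]
    simp [List.getD, List.getElem?_eq_getElem h]
  · rw [if_neg (by exact_mod_cast h)]
    rw [PySem.List.pyGet?_natCast]
    simp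
    omega

-- ===== VERDICT (by name: the statement is the Claim_ definition above) =====
theorem in_tuple_spec : Claim_equal_in_tuple := by
  intro dt _ hpre
  unfold Spec_in_tuple
  simp only [in_tuple, in_tuple_alt]
  set iterations : Int :=
    (PySem.List.pyGet? (PySem.List.sorted (dt.map (fun item => (item.length : Int))) (fun x => x) false) (-1)).getD 0
    with hiter
  have h0 : (0 : Int) ≤ iterations := by
    rw [hiter, PySem.List.pyGet?_neg_one]
    cases hL : (PySem.List.sorted (dt.map (fun item => (item.length : Int))) (fun x => x) false).getLast? with
    | none => simp
    | some v =>
      have hv : v ∈ PySem.List.sorted (dt.map (fun item => (item.length : Int))) (fun x => x) false :=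
        List.mem_of_getLast? hL
      rw [PySem.List.mem_sorted] at hv
      obtain ⟨x, _, hx⟩ := List.mem_map.mp hv
      simp [← hx]
  obtain ⟨n, hn⟩ : ∃ m : Nat, iterations = (m : Int) := ⟨iterations.toNat, (Int.toNat_of_nonneg h0).symm⟩
  rw [hn, PySem.List.pyRange_zero_natCast]
  -- A side: the nested appending foldls become a map of maps
  rw [PySem.List.foldl_append_singleton_eq_map, List.nil_append, List.map_map]
  -- B side: fuse the casts into the column generators, replace each entry by pyGet?, transpose
  have hB : (dt.map (fun element =>
        ((List.range n).map (fun (k : Nat) => ((k : Int)))).map (fun i =>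
          if i < (element.length : Int) then some (PySem.List.pyGetD element i 0) else none)))
      = dt.map (fun x => (List.range n).map (fun k => PySem.List.pyGet? x ((k : Nat) : Int))) := by
    simp only [List.map_map, Function.comp_def]
    refine List.map_congr_left (fun x _ => ?_)
    exact List.map_congr_left (fun k _ => column_entry x k)
  rw [hB, pvZipStar_map_range _ _ hpre]
  refine List.map_congr_left (fun k _ => ?_)
  simp [flatten_map_singleton]
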